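-- pv_equiv track=rewrite | github.com/Dancesoul/leetcodebywhy | Solutions3.py | maxmiumScore
-- ===== SOURCE A (Python) =====
-- from typing import List
--
-- def maxmiumScore(cards: List[int], cnt: int) -> int:
--     """
--     LCP 40. 心算挑战
--     :param cards:
--     :param cnt:
--     :return:
--     """
--     cards.sort(reverse=True)
--     odd = []  # 奇数
--     even = []  # 偶数
--     for card in cards:
--         if card & 1:
--             odd.append(card)
--         else:
--             even.append(card)
--     res = 0
--     if cnt & 1:
--         if len(even):  # 判断奇偶，奇数的话，直接取偶数最大来成对
--             res += even.pop(0)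
--         else:
--             return 0
--     cnt >>= 1
--     alls = []
--     for i in range(len(odd) >> 1):
--         alls.append(odd[2 * i] + odd[2 * i + 1])
--
--     for i in range(len(even) >> 1):
--         alls.append(even[2 * i] + even[2 * i + 1])
--
--     card_ = sorted(alls, reverse=True)
--
--     return res + sum(card_[:cnt]) if cnt <= len(card_) else 0
-- ===== SOURCE B (Python) =====
-- def _pair_sums(xs):
--     out = []
--     for i in range(1, len(xs), 2):
--         out.append(xs[i - 1] + xs[i])
--     return out
--
--
-- def _merge_desc(xs, ys):
--     out = []
--     i = j = 0
--     while i < len(xs) and j < len(ys):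
--         if xs[i] >= ys[j]:
--             out.append(xs[i])
--             i += 1
--         else:
--             out.append(ys[j])
--             j += 1
--     out.extend(xs[i:])
--     out.extend(ys[j:])
--     return out
--
--
-- def maxmiumScore(cards, cnt):
--     cards.sort(reverse=True)
--     odds = [c for c in cards if c % 2 != 0]
--     evens = [c for c in cards if c % 2 == 0]
--     res = 0
--     if cnt % 2 != 0:
--         if not evens:
--             return 0
--         res = evens[0]
--         evens = evens[1:]
--     k = cnt // 2
--     merged = _merge_desc(_pair_sums(odds), _pair_sums(evens))
--     if k > len(merged):
--         return 0
--     return res + sum(merged[:k])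
-- ===== Notes on version B (the rewrite author's own statement) =====
-- stated objective: alternative
-- what changed: B builds the odd-pair and even-pair sum lists directly (they are already descending) and combines them with an O(n) two-pointer merge and a single parity/feasibility check, instead of A's append-into-two-lists loop, index-range pair loops and a second full sort of the combined pair list.
import Mathlib
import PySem

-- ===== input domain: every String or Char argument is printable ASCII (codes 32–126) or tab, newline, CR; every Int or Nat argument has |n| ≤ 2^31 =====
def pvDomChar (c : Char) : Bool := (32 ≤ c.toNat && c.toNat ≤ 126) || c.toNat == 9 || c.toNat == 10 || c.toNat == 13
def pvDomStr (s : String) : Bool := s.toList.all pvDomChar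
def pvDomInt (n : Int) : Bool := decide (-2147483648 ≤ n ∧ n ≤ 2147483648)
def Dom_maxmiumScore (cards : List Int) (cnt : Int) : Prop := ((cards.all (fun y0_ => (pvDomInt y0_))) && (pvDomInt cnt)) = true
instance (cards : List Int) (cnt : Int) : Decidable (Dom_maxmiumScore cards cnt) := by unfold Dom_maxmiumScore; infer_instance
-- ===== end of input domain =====

-- B replaces A's concatenate-then-sort pair construction by an O(n) two-pointer merge of the two
-- already-descending pair-sum lists (objective: alternative). Return-value equivalence only on the
-- Lean side; in Python both A and B sort `cards` in place (same observable mutation).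


-- ===== PORT A =====
def maxmiumScore (cards : List Int) (cnt : Int) : Int :=
  let s := PySem.List.sorted cards (fun x => x) true          -- cards.sort(reverse=True)
  let oe := s.foldl (fun (p : List Int × List Int) card =>
      if PySem.Int.band card 1 ≠ 0 then (p.1 ++ [card], p.2) else (p.1, p.2 ++ [card])) ([], [])
  let odd := oe.1
  let even := oe.2
  let res : Int := 0
  if PySem.Int.band cnt 1 ≠ 0 ∧ even.length = 0 then 0        -- the 'else: return 0' branch
  else
    -- even.pop(0) under the guard len(even) ≠ 0: first element, rest of the list (exact here)
    let res := if PySem.Int.band cnt 1 ≠ 0 then res + PySem.List.pyGetD even 0 0 else res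
    let even := if PySem.Int.band cnt 1 ≠ 0 then even.drop 1 else even
    let cnt := cnt >>> (1 : Nat)                              -- cnt >>= 1
    let alls := (PySem.List.pyRange 0 ((odd.length >>> 1 : Nat) : Int) 1).foldl
        (fun acc i => acc ++ [PySem.List.pyGetD odd (2*i) 0 + PySem.List.pyGetD odd (2*i+1) 0]) []
    let alls := (PySem.List.pyRange 0 ((even.length >>> 1 : Nat) : Int) 1).foldl
        (fun acc i => acc ++ [PySem.List.pyGetD even (2*i) 0 + PySem.List.pyGetD even (2*i+1) 0]) alls
    let card_ := PySem.List.sorted alls (fun x => x) true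
    if cnt ≤ (card_.length : Int) then res + (PySem.List.slice card_ none (some cnt)).sum else 0

-- ===== PORT B =====
-- sums of consecutive pairs: for i in range(1, len(xs), 2): out.append(xs[i-1] + xs[i])
def pairsB (xs : List Int) : List Int :=
  (PySem.List.pyRange 1 (xs.length : Int) 2).foldl
    (fun acc i => acc ++ [PySem.List.pyGetD xs (i-1) 0 + PySem.List.pyGetD xs i 0]) []

-- two-pointer merge of two descending lists (the while loop of _merge_desc, one step per emitted element)
def mergeDesc : List Int → List Int → List Int
  | [], ys => ys
  | x :: xs, [] => x :: xs
  | x :: xs, y :: ys =>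
    if x ≥ y then x :: mergeDesc xs (y :: ys) else y :: mergeDesc (x :: xs) ys
termination_by xs ys => xs.length + ys.length

def maxmiumScore_alt (cards : List Int) (cnt : Int) : Int :=
  let s := PySem.List.sorted cards (fun x => x) true          -- cards.sort(reverse=True)
  let odds := s.filter (fun c => decide (PySem.Int.mod c 2 ≠ 0))
  let evens := s.filter (fun c => decide (PySem.Int.mod c 2 = 0))
  if PySem.Int.mod cnt 2 ≠ 0 ∧ evens = [] then 0
  else
    let res : Int := if PySem.Int.mod cnt 2 ≠ 0 then PySem.List.pyGetD evens 0 0 else 0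
    let evens := if PySem.Int.mod cnt 2 ≠ 0 then PySem.List.slice evens (some 1) none else evens
    let k := PySem.Int.floordiv cnt 2
    let merged := mergeDesc (pairsB odds) (pairsB evens)
    if k > (merged.length : Int) then 0
    else res + (PySem.List.slice merged none (some k)).sum

-- ===== PRECONDITION & SPEC =====
def Spec_maxmiumScore (cards : List Int) (cnt : Int) (out : Int) : Prop := out = maxmiumScore_alt cards cnt
instance (cards : List Int) (cnt : Int) (out : Int) : Decidable (Spec_maxmiumScore cards cnt out) := by unfold Spec_maxmiumScore; infer_instance

-- ===== CLAIM (what is proved, stated in full; the proofs are below) =====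
def Claim_equal_maxmiumScore : Prop := ∀ (cards : List Int) (cnt : Int), Dom_maxmiumScore cards cnt → Spec_maxmiumScore cards cnt (maxmiumScore cards cnt)

-- ===== LEMMAS AND PROOFS =====

-- canonical list of consecutive pair sums, used to align both ports' pair constructions
def pairSpec (xs : List Int) : List Int :=
  (List.range (xs.length >>> 1)).map (fun k => xs.getD (2*k) 0 + xs.getD (2*k+1) 0)

lemma foldA_eq_pairSpec (xs acc : List Int) :
    (PySem.List.pyRange 0 ((xs.length >>> 1 : Nat) : Int) 1).foldl
      (fun acc i => acc ++ [PySem.List.pyGetD xs (2*i) 0 + PySem.List.pyGetD xs (2*i+1) 0]) acc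
    = acc ++ pairSpec xs := by
  rw [PySem.List.foldl_append_singleton_eq_map]
  congr 1
  rw [PySem.List.pyRange_zero_natCast, List.map_map]
  apply List.map_congr_left
  intro k hk
  simp only [Function.comp]
  have h3 : (2 * ((k : Nat) : Int) + 1) = ((2*k+1 : Nat) : Int) := by push_cast; ring
  have h2 : (2 * ((k : Nat) : Int)) = ((2*k : Nat) : Int) := by push_cast; ring
  rw [h3, h2, PySem.List.pyGetD_natCast, PySem.List.pyGetD_natCast]

lemma pairsB_eq_pairSpec (xs : List Int) : pairsB xs = pairSpec xs := by
  unfold pairsB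
  rw [PySem.List.foldl_append_singleton_eq_map, List.nil_append,
      PySem.List.pyRange_of_pos 1 (xs.length : Int) (by norm_num : (0:Int) < 2), List.map_map]
  have hm : (if (1:Int) < (xs.length : Int) then (((xs.length : Int) - 1 + 2 - 1)/2).toNat else 0)
      = xs.length >>> 1 := by
    rw [Nat.shiftRight_one]
    split_ifs with h <;> omega
  rw [hm]
  apply List.map_congr_left
  intro k hk
  simp only [Function.comp]
  have h1 : (1 + 2 * ((k : Nat) : Int) - 1) = ((2*k : Nat) : Int) := by push_cast; ring
  have h2 : (1 + 2 * ((k : Nat) : Int)) = ((2*k+1 : Nat) : Int) := by push_cast; ring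
  rw [h1, h2, PySem.List.pyGetD_natCast, PySem.List.pyGetD_natCast]

lemma pairSpec_pairwise {xs : List Int} (h : xs.Pairwise (fun a b => b ≤ a)) :
    (pairSpec xs).Pairwise (fun a b => b ≤ a) := by
  unfold pairSpec
  rw [List.pairwise_iff_getElem] at h ⊢
  intro i j hi hj hij
  simp only [List.length_map, List.length_range, Nat.shiftRight_one] at hi hj
  have hjb : 2*j + 1 < xs.length := by omega
  have hib : 2*i + 1 < xs.length := by omega
  simp only [List.getElem_map, List.getElem_range,
    List.getD_eq_getElem xs 0 (by omega : 2*i < xs.length),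
    List.getD_eq_getElem xs 0 (by omega : 2*j < xs.length),
    List.getD_eq_getElem xs 0 hib, List.getD_eq_getElem xs 0 hjb]
  exact add_le_add (h (2*i) (2*j) (by omega) (by omega) (by omega))
    (h (2*i+1) (2*j+1) (by omega) (by omega) (by omega))

lemma mergeDesc_perm (xs ys : List Int) : (mergeDesc xs ys).Perm (xs ++ ys) := by
  fun_induction mergeDesc xs ys with
  | case1 ys => simp
  | case2 x xs => simp
  | case3 x xs y ys h ih => exact ih.cons x
  | case4 x xs y ys h ih => exact (ih.cons y).trans List.perm_middle.symm

lemma mergeDesc_pairwise {xs ys : List Int} (hx : xs.Pairwise (fun a b => b ≤ a))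
    (hy : ys.Pairwise (fun a b => b ≤ a)) : (mergeDesc xs ys).Pairwise (fun a b => b ≤ a) := by
  fun_induction mergeDesc xs ys with
  | case1 ys => exact hy
  | case2 x xs => exact hx
  | case3 x xs y ys h ih =>
    rw [List.pairwise_cons] at hx ⊢
    refine ⟨?_, ih hx.2 hy⟩
    intro z hz
    rcases (mergeDesc_perm xs (y :: ys)).mem_iff.mp hz with hz2
    rcases List.mem_append.mp hz2 with h1 | h2
    · exact hx.1 z h1
    · rcases List.mem_cons.mp h2 with rfl | h3
      · exact h
      · exact le_trans ((List.pairwise_cons.mp hy).1 z h3) h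
  | case4 x xs y ys h ih =>
    rw [List.pairwise_cons] at hy ⊢
    refine ⟨?_, ih hx hy.2⟩
    intro z hz
    rcases (mergeDesc_perm (x :: xs) ys).mem_iff.mp hz with hz2
    rcases List.mem_append.mp hz2 with h1 | h2
    · rcases List.mem_cons.mp h1 with rfl | h3
      · omega
      · exact le_trans ((List.pairwise_cons.mp hx).1 z h3) (by omega)
    · exact hy.1 z h2

lemma sorted_rev_eq_mergeDesc (p q : List Int) (hp : p.Pairwise (fun a b => b ≤ a))
    (hq : q.Pairwise (fun a b => b ≤ a)) :
    PySem.List.sorted (p ++ q) (fun x => x) true = mergeDesc p q := by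
  apply PySem.List.eq_of_perm_of_pairwise_le_of_injective (key := fun x : Int => -x) neg_injective
  · exact (PySem.List.sorted_perm _ _ _).trans (mergeDesc_perm p q).symm
  · exact (PySem.List.sorted_pairwise_rev _ _).imp (fun h => by simpa using h)
  · exact (mergeDesc_pairwise hp hq).imp (fun h => by simpa using h)

lemma partition_fold (s o e : List Int) :
    s.foldl (fun (p : List Int × List Int) card =>
        if PySem.Int.mod card 2 ≠ 0 then (p.1 ++ [card], p.2) else (p.1, p.2 ++ [card])) (o, e)
    = (o ++ s.filter (fun c => decide (PySem.Int.mod c 2 ≠ 0)),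
       e ++ s.filter (fun c => decide (PySem.Int.mod c 2 = 0))) := by
  induction s generalizing o e with
  | nil => simp
  | cons x t ih =>
    rw [List.foldl_cons]
    by_cases h : PySem.Int.mod x 2 ≠ 0
    · rw [if_pos h, ih,
          List.filter_cons_of_pos (by rw [decide_eq_true_eq]; exact h),
          List.filter_cons_of_neg (by rw [decide_eq_true_eq]; exact h)]
      simp [List.append_assoc]
    · rw [if_neg h, ih,
          List.filter_cons_of_neg (by rw [decide_eq_true_eq]; exact h),
          List.filter_cons_of_pos (by rw [decide_eq_true_eq]; exact not_not.mp h)]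
      simp [List.append_assoc]

lemma shiftR_one_int (c : Int) : c >>> (1 : Nat) = PySem.Int.floordiv c 2 := by
  rw [PySem.Int.floordiv_eq_ediv_of_pos (by norm_num), Int.shiftRight_eq_div_pow]
  norm_num

-- ===== VERDICT (by name: the statement is the Claim_ definition above) =====
theorem maxmiumScore_spec : Claim_equal_maxmiumScore := by
  intro cards cnt _
  show maxmiumScore cards cnt = maxmiumScore_alt cards cnt
  simp only [maxmiumScore, maxmiumScore_alt, PySem.Int.band_one]
  rw [partition_fold]
  simp only [List.nil_append]
  set s := PySem.List.sorted cards (fun x => x) true with hs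
  set odds := s.filter (fun x => decide (PySem.Int.mod x 2 ≠ 0)) with hodds
  set evens := s.filter (fun x => decide (PySem.Int.mod x 2 = 0)) with hevens
  have hsdesc : s.Pairwise (fun a b => b ≤ a) := PySem.List.sorted_pairwise_rev cards (fun x => x)
  have hod : odds.Pairwise (fun a b => b ≤ a) := hsdesc.filter _
  have hed : evens.Pairwise (fun a b => b ≤ a) := hsdesc.filter _
  simp only [List.length_eq_zero_iff]
  by_cases hg : PySem.Int.mod cnt 2 ≠ 0 ∧ evens = []
  · rw [if_pos hg, if_pos hg]
  · rw [if_neg hg, if_neg hg]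
    rw [PySem.List.slice_from_one]
    simp only [zero_add, List.drop_one]
    set evens' := if PySem.Int.mod cnt 2 ≠ 0 then evens.tail else evens with hevens'
    have hed' : evens'.Pairwise (fun a b => b ≤ a) := by
      rw [hevens']; split_ifs
      · exact hed.sublist (List.tail_sublist evens)
      · exact hed
    rw [foldA_eq_pairSpec, foldA_eq_pairSpec, List.nil_append]
    rw [pairsB_eq_pairSpec, pairsB_eq_pairSpec]
    rw [sorted_rev_eq_mergeDesc _ _ (pairSpec_pairwise hod) (pairSpec_pairwise hed')]
    rw [shiftR_one_int]
    by_cases hk : PySem.Int.floordiv cnt 2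
        ≤ ((mergeDesc (pairSpec odds) (pairSpec evens')).length : Int)
    · rw [if_pos hk, if_neg (not_lt.mpr hk)]
    · rw [if_neg hk, if_pos (not_le.mp hk)]
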